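-- pv_equiv track=rewrite | github.com/arkworks-rs/algebra | scripts/test_vectors.py | generate_from_bytes_mod_order_test_vector
-- ===== SOURCE A (Python) =====
-- def generate_from_bytes_mod_order_test_vector(modulus):
--     def gen_vector(number):
--         byte_arr = convert_int_to_byte_vec(number)
--         # s = str(number % modulus)
--         # return "(" + byte_arr + ", \"" + s + "\"),"
--         return byte_arr + ","
--
--     data = ["vec!["]
--
--     small_values_to_test = [0, 1, 255, 256, 256 * 256 + 255]
--     modulus_bits = int((len(bin(modulus)[2:]) + 7) / 8) * 8
--     values_to_test = small_values_to_test + [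
--         modulus >> 8,
--         (modulus >> 8) + 1,
--         modulus - 1,
--         modulus,
--         modulus + 1,
--         modulus * 2,
--         modulus * 256,
--         17 + (1 << modulus_bits),
--         19 + (1 << modulus_bits) + modulus,
--         81 + (1 << modulus_bits) * 256 + modulus,
--     ]
--
--     for i in values_to_test:
--         data += ["// " + str(i)]
--         data += [gen_vector(i)]
--
--     data += ["];"]
--     return "\n".join(data)
--
-- def convert_int_to_byte_vec(number):
--     s = bin(number)[2:]
--     num_bytes = int((len(s) + 7) / 8)
--     s = s.zfill(num_bytes * 8)
--
--     byte_arr = []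
--     for i in range(num_bytes):
--         byte = s[i * 8 : (i + 1) * 8]
--         i = int(byte, 2)
--         byte_arr += [str(i) + "u8"]
--
--     data = ", ".join(byte_arr)
--     return "vec![" + data + "]"
-- ===== SOURCE B (Python) =====
-- def generate_from_bytes_mod_order_test_vector(modulus):
--     modulus_bits = ((max(modulus.bit_length(), 1) + 7) // 8) * 8
--     values_to_test = [
--         0, 1, 255, 256, 256 * 256 + 255,
--         modulus >> 8, (modulus >> 8) + 1, modulus - 1, modulus, modulus + 1,
--         modulus * 2, modulus * 256, 17 + (1 << modulus_bits),
--         19 + (1 << modulus_bits) + modulus, 81 + (1 << modulus_bits) * 256 + modulus,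
--     ]
--
--     def byte_vec_line(v):
--         num_bytes = (max(v.bit_length(), 1) + 7) // 8
--         body = ", ".join("%du8" % b for b in v.to_bytes(num_bytes, "big"))
--         return "vec![" + body + "],"
--
--     parts = (["vec!["]
--              + [p for v in values_to_test for p in ("// " + str(v), byte_vec_line(v))]
--              + ["];"])
--     return "\n".join(parts)
-- ===== Notes on version B (the rewrite author's own statement) =====
-- stated objective: idiomatic
-- what changed: The integer-to-byte-vector conversion is rewritten arithmetically: instead of building a binary string with bin(), zero-padding it with zfill and parsing 8-character slices back with int(s, 2), B computes the byte count from bit_length() and formats the bytes of v.to_bytes(n, 'big') directly; the surrounding test-vector assembly becomes a flat comprehension instead of an accumulating loop.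
import Mathlib
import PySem

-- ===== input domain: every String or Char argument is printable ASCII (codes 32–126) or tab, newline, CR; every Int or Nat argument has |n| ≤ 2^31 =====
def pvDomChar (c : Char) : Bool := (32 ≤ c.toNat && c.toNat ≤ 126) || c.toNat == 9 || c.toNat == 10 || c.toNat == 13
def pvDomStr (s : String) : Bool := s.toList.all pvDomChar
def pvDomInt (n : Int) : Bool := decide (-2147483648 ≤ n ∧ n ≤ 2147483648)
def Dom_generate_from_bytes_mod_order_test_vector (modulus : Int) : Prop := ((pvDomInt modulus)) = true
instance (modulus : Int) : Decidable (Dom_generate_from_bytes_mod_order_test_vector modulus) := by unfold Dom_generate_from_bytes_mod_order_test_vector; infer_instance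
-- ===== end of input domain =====

-- B replaces A's bin()/zfill/8-bit-string-slice parsing by direct arithmetic byte decomposition (idiomatic, same cost).

-- ===== PORT A =====
-- the 'for i in range(num_bytes)' loop of convert_int_to_byte_vec; int(byte, 2) is PySem.Int.ofCharsBase? _ 2
-- (none exactly where Python raises ValueError — only reachable for number < 0, excluded by Pre_)
def pvLoopA (s : List Char) (numBytes : Nat) : Option (List (List Char)) :=
  (PySem.List.pyRange 0 (numBytes : Int) 1).foldl
    (fun a i => a.bind fun byteArr =>
      (PySem.Int.ofCharsBase? (PySem.List.slice s (some (i * 8)) (some ((i + 1) * 8))) 2).map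
        (fun v => byteArr ++ [PySem.Int.toChars v ++ ['u', '8']]))
    (some [])

-- int((len(s) + 7) / 8) is ported as Nat division: exact, the operand is a small nonnegative integer
def convert_int_to_byte_vec (number : Int) : Option (List Char) :=
  let s := (PySem.Int.toBinChars0b number).drop 2
  let numBytes : Nat := (s.length + 7) / 8
  let s := PySem.Chars.zfill s ((numBytes * 8 : Nat) : Int)
  (pvLoopA s numBytes).map fun byteArr =>
    ['v','e','c','!','['] ++ PySem.Chars.join [',', ' '] byteArr ++ [']']

def generate_from_bytes_mod_order_test_vector (modulus : Int) : String :=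
  let small_values_to_test : List Int := [0, 1, 255, 256, 256 * 256 + 255]
  let modulus_bits : Nat := (((PySem.Int.toBinChars0b modulus).drop 2).length + 7) / 8 * 8
  let values_to_test : List Int := small_values_to_test ++
    [modulus >>> (8:Nat), (modulus >>> (8:Nat)) + 1, modulus - 1, modulus, modulus + 1,
     modulus * 2, modulus * 256, 17 + ((1 : Int) <<< modulus_bits),
     19 + ((1 : Int) <<< modulus_bits) + modulus,
     81 + ((1 : Int) <<< modulus_bits) * 256 + modulus]
  let data : Option (List (List Char)) :=
    values_to_test.foldl
      (fun a i => a.bind fun d =>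
        (convert_int_to_byte_vec i).map fun bv =>
          d ++ [['/','/',' '] ++ PySem.Int.toChars i] ++ [bv ++ [',']])
      (some [['v','e','c','!','[']])
  match data with
  | some d => String.ofList (PySem.Chars.join ['\n'] (d ++ [[']',';']]))
  | none => ""   -- Python raises here (only for modulus ≤ 0); excluded by Pre_

-- ===== PORT B =====
-- v.to_bytes(numBytes, 'big'): exact for 0 ≤ v < 256^numBytes (Python raises otherwise; excluded by Pre_)
def pvBytesBE : Nat → Nat → List Nat
  | _, 0 => []
  | n, k + 1 => pvBytesBE (n / 256) k ++ [n % 256]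

def pvByteVecLine (v : Int) : List Char :=
  let numBytes : Nat := (max (PySem.Int.bitLength v) 1 + 7) / 8
  let body := PySem.Chars.join [',', ' ']
    ((pvBytesBE v.toNat numBytes).map fun b => PySem.Int.toChars (b : Int) ++ ['u', '8'])
  ['v','e','c','!','['] ++ body ++ [']', ',']

def generate_from_bytes_mod_order_test_vector_alt (modulus : Int) : String :=
  let modulus_bits : Nat := (max (PySem.Int.bitLength modulus) 1 + 7) / 8 * 8
  let values_to_test : List Int :=
    [0, 1, 255, 256, 256 * 256 + 255,
     modulus >>> (8:Nat), (modulus >>> (8:Nat)) + 1, modulus - 1, modulus, modulus + 1,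
     modulus * 2, modulus * 256, 17 + ((1 : Int) <<< modulus_bits),
     19 + ((1 : Int) <<< modulus_bits) + modulus,
     81 + ((1 : Int) <<< modulus_bits) * 256 + modulus]
  let parts := [['v','e','c','!','[']] ++
    values_to_test.flatMap (fun v => [['/','/',' '] ++ PySem.Int.toChars v, pvByteVecLine v]) ++
    [[']',';']]
  String.ofList (PySem.Chars.join ['\n'] parts)

-- ===== PRECONDITION & SPEC =====
-- Pre_ excludes exactly modulus ≤ 0, where A raises ValueError (int('b…', 2) on the negative values in the list)
def Pre_generate_from_bytes_mod_order_test_vector (modulus : Int) : Prop := 1 ≤ modulus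
instance (modulus : Int) : Decidable (Pre_generate_from_bytes_mod_order_test_vector modulus) := by unfold Pre_generate_from_bytes_mod_order_test_vector; infer_instance
def pvWitness_generate_from_bytes_mod_order_test_vector : Int := (7)

def Spec_generate_from_bytes_mod_order_test_vector (modulus : Int) (out : String) : Prop := out = generate_from_bytes_mod_order_test_vector_alt modulus
instance (modulus : Int) (out : String) : Decidable (Spec_generate_from_bytes_mod_order_test_vector modulus out) := by unfold Spec_generate_from_bytes_mod_order_test_vector; infer_instance

-- ===== CLAIM (what is proved, stated in full; the proofs are below) =====
def Claim_equal_generate_from_bytes_mod_order_test_vector : Prop := ∀ (modulus : Int), Dom_generate_from_bytes_mod_order_test_vector modulus → Pre_generate_from_bytes_mod_order_test_vector modulus → Spec_generate_from_bytes_mod_order_test_vector modulus (generate_from_bytes_mod_order_test_vector modulus)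

-- ===== LEMMAS AND PROOFS =====

-- the big-endian fixed-width bit string of n (m binary digit characters)
def pvBitsFixed : Nat → Nat → List Char
  | _, 0 => []
  | n, m + 1 => pvBitsFixed (n / 2) m ++ [Nat.digitChar (n % 2)]

-- what both programs print for one value, as established by the lemmas below
def pvCore (n : Nat) : List Char :=
  ['v','e','c','!','['] ++
    PySem.Chars.join [',', ' ']
      ((pvBytesBE n ((max (PySem.Int.bitLength (n : Int)) 1 + 7) / 8)).map
        fun b => PySem.Int.toChars (b : Int) ++ ['u', '8']) ++ [']']

theorem pvBitsFixed_zero (m : Nat) : pvBitsFixed 0 m = List.replicate m '0' := by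
  induction m with
  | zero => rfl
  | succ m ih =>
    rw [pvBitsFixed, ih, List.replicate_succ' (n := m)]
    norm_num [Nat.digitChar]

theorem length_pvBitsFixed (n m : Nat) : (pvBitsFixed n m).length = m := by
  induction m generalizing n with
  | zero => rfl
  | succ m ih => simp [pvBitsFixed, ih]

theorem pv_binBody_natCast (n : Nat) :
    (PySem.Int.toBinChars0b (n : Int)).drop 2 = Nat.toDigits 2 n := by
  unfold PySem.Int.toBinChars0b
  rw [if_neg (by omega : ¬((n : Int) < 0))]
  simp

theorem pv_lenBL (n : Nat) :
    (Nat.toDigits 2 n).length = max (PySem.Int.bitLength (n : Int)) 1 := by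
  rcases Nat.eq_zero_or_pos n with rfl | hn
  · simp [Nat.toDigits_of_lt_base (by norm_num : 0 < 2), PySem.Int.bitLength_zero]
  · have hne : (n : Int) ≠ 0 := by exact_mod_cast hn.ne'
    have hlt : n < 2 ^ PySem.Int.bitLength (n : Int) := by
      have := PySem.Int.lt_two_pow_bitLength (n : Int)
      simpa using this
    have hge : 2 ^ (PySem.Int.bitLength (n : Int) - 1) ≤ n := by
      have := PySem.Int.two_pow_bitLength_le (n : Int) hne
      simpa using this
    have hBpos : 0 < PySem.Int.bitLength (n : Int) := by
      by_contra h
      have hB : PySem.Int.bitLength (n : Int) = 0 := by omega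
      rw [hB] at hlt; omega
    have hle : (Nat.toDigits 2 n).length ≤ PySem.Int.bitLength (n : Int) :=
      (Nat.length_toDigits_le_iff (by norm_num) hBpos).2 hlt
    have hgt : PySem.Int.bitLength (n : Int) - 1 < (Nat.toDigits 2 n).length := by
      rcases Nat.eq_zero_or_pos (PySem.Int.bitLength (n : Int) - 1) with h0 | h0
      · have := Nat.length_toDigits_pos (b := 2) (n := n); omega
      · by_contra h
        have := (Nat.length_toDigits_le_iff (b := 2) (n := n) (by norm_num) h0).1 (by omega)
        omega
    omega

theorem pv_zfill_toDigits (n w : Nat) :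
    PySem.Chars.zfill (Nat.toDigits 2 n) (w : Int) =
      List.replicate (w - (Nat.toDigits 2 n).length) '0' ++ Nat.toDigits 2 n := by
  have hpos := Nat.length_toDigits_pos (b := 2) (n := n)
  rcases hcs : Nat.toDigits 2 n with _ | ⟨c, rest⟩
  · rw [hcs] at hpos; simp at hpos
  · have hc : c.isDigit :=
      Nat.isDigit_of_mem_toDigits (b := 2) (n := n) (by norm_num) (by norm_num)
        (by rw [hcs]; exact List.mem_cons_self)
    have hsign : ¬(c = '+' ∨ c = '-') := by
      rintro (rfl | rfl) <;> exact absurd hc (by decide)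
    unfold PySem.Chars.zfill
    split_ifs with h
    · have hw : w ≤ rest.length + 1 := by
        have := h; simp at this; omega
      have h0 : w - (c :: rest).length = 0 := by simp; omega
      rw [h0]
      simp
    · simp [hsign]

theorem pv_pad_eq : ∀ (m n : Nat), (Nat.toDigits 2 n).length ≤ m →
    List.replicate (m - (Nat.toDigits 2 n).length) '0' ++ Nat.toDigits 2 n = pvBitsFixed n m := by
  intro m
  induction m with
  | zero =>
    intro n h
    have := Nat.length_toDigits_pos (b := 2) (n := n); omega
  | succ m ih =>
    intro n h
    by_cases hn : n < 2
    · have hd : Nat.toDigits 2 n = [Nat.digitChar n] := Nat.toDigits_of_lt_base hn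
      rw [hd]
      show List.replicate (m + 1 - 1) '0' ++ [Nat.digitChar n] = pvBitsFixed n (m + 1)
      rw [pvBitsFixed, Nat.div_eq_of_lt hn, Nat.mod_eq_of_lt hn, pvBitsFixed_zero]
      simp
    · have hd : Nat.toDigits 2 n = Nat.toDigits 2 (n / 2) ++ [(n % 2).digitChar] :=
        Nat.toDigits_of_base_le (by norm_num) (by omega)
      have hlen : (Nat.toDigits 2 n).length = (Nat.toDigits 2 (n / 2)).length + 1 := by
        rw [hd]; simp
      rw [pvBitsFixed, ← ih (n / 2) (by omega), hd]
      have hL2 : (Nat.toDigits 2 (n / 2) ++ [(n % 2).digitChar]).length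
          = (Nat.toDigits 2 (n / 2)).length + 1 := by simp
      rw [hL2]
      have heq : m + 1 - ((Nat.toDigits 2 (n / 2)).length + 1)
          = m - (Nat.toDigits 2 (n / 2)).length := by omega
      rw [heq, ← List.append_assoc]

theorem pv_chunk : ∀ (j m n : Nat),
    pvBitsFixed n (m + j) = pvBitsFixed (n / 2 ^ j) m ++ pvBitsFixed (n % 2 ^ j) j := by
  intro j
  induction j with
  | zero => intro m n; simp [pvBitsFixed]
  | succ j ih =>
    intro m n
    have h1 : n / 2 / 2 ^ j = n / 2 ^ (j + 1) := by
      rw [Nat.div_div_eq_div_mul]; ring_nf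
    have h2 : n % 2 ^ (j + 1) / 2 = n / 2 % 2 ^ j := by
      rw [pow_succ, mul_comm, Nat.mod_mul_right_div_self]
    have h3 : n % 2 ^ (j + 1) % 2 = n % 2 := by
      exact Nat.mod_mod_of_dvd n (dvd_pow_self 2 (Nat.succ_ne_zero j))
    show pvBitsFixed n (m + j + 1) = _
    rw [pvBitsFixed, ih (m := m) (n := n / 2), pvBitsFixed, h1, h2, h3, List.append_assoc]

set_option maxHeartbeats 1000000 in
set_option maxRecDepth 10000 in
theorem pv_parse8 : ∀ b : Fin 256,
    PySem.Int.ofCharsBase? (pvBitsFixed b.val 8) 2 = some (b.val : Int) := by decide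

theorem pv_loopA_aux : ∀ (k n : Nat) (acc : List (List Char)),
    (PySem.List.pyRange 0 (k : Int) 1).foldl
      (fun a i => a.bind fun byteArr =>
        (PySem.Int.ofCharsBase?
            (PySem.List.slice (pvBitsFixed n (8 * k)) (some (i * 8)) (some ((i + 1) * 8))) 2).map
          (fun v => byteArr ++ [PySem.Int.toChars v ++ ['u', '8']]))
      (some acc)
    = some (acc ++ (pvBytesBE n k).map fun b => PySem.Int.toChars (b : Int) ++ ['u', '8']) := by
  intro k
  induction k with
  | zero =>
    intro n acc
    rw [PySem.List.pyRange_one_eq_nil (by norm_num)]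
    simp [pvBytesBE]
  | succ k ih =>
    intro n acc
    have hsplit : pvBitsFixed n (8 * (k + 1)) =
        pvBitsFixed (n / 256) (8 * k) ++ pvBitsFixed (n % 256) 8 := by
      have := pv_chunk 8 (8 * k) n
      have h1 : 8 * (k + 1) = 8 * k + 8 := by ring
      have h2 : (2 : Nat) ^ 8 = 256 := by norm_num
      rw [h1, this, h2]
    have hrange : PySem.List.pyRange 0 ((k + 1 : Nat) : Int) 1 =
        PySem.List.pyRange 0 (k : Int) 1 ++ [(k : Int)] := by
      push_cast
      exact PySem.List.pyRange_one_succ_right (by positivity)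
    rw [hrange, List.foldl_append, hsplit]
    have hcong :
        (PySem.List.pyRange 0 (k : Int) 1).foldl
          (fun a i => a.bind fun byteArr =>
            (PySem.Int.ofCharsBase?
                (PySem.List.slice (pvBitsFixed (n / 256) (8 * k) ++ pvBitsFixed (n % 256) 8)
                  (some (i * 8)) (some ((i + 1) * 8))) 2).map
              (fun v => byteArr ++ [PySem.Int.toChars v ++ ['u', '8']]))
          (some acc)
        = (PySem.List.pyRange 0 (k : Int) 1).foldl
          (fun a i => a.bind fun byteArr =>
            (PySem.Int.ofCharsBase?
                (PySem.List.slice (pvBitsFixed (n / 256) (8 * k))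
                  (some (i * 8)) (some ((i + 1) * 8))) 2).map
              (fun v => byteArr ++ [PySem.Int.toChars v ++ ['u', '8']]))
          (some acc) := by
      apply PySem.List.foldl_congr_mem
      intro a i hi
      obtain ⟨h0, hik⟩ := (PySem.List.mem_pyRange_one).1 hi
      obtain ⟨m, rfl⟩ : ∃ m : Nat, i = (m : Int) := ⟨i.toNat, (Int.toNat_of_nonneg h0).symm⟩
      have hmk : m < k := by exact_mod_cast hik
      have hslice : PySem.List.slice (pvBitsFixed (n / 256) (8 * k) ++ pvBitsFixed (n % 256) 8)
            (some ((m : Int) * 8)) (some (((m : Int) + 1) * 8))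
          = PySem.List.slice (pvBitsFixed (n / 256) (8 * k))
            (some ((m : Int) * 8)) (some (((m : Int) + 1) * 8)) := by
        have ha : ((m : Int) * 8) = ((m * 8 : Nat) : Int) := by push_cast; ring
        have hb : (((m : Int) + 1) * 8) = ((m * 8 + 8 : Nat) : Int) := by push_cast; ring
        rw [ha, hb, PySem.List.slice_natCast, PySem.List.slice_natCast]
        have hlen : (pvBitsFixed (n / 256) (8 * k)).length = 8 * k := length_pvBitsFixed _ _
        rw [List.drop_append_of_le_length (by omega)]
        rw [List.take_append_of_le_length (by simp [hlen]; omega)]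
      rw [hslice]
    rw [hcong, ih (n / 256) acc]
    have hlast : PySem.List.slice (pvBitsFixed (n / 256) (8 * k) ++ pvBitsFixed (n % 256) 8)
          (some ((k : Int) * 8)) (some (((k : Int) + 1) * 8))
        = pvBitsFixed (n % 256) 8 := by
      have ha : ((k : Int) * 8) = ((8 * k : Nat) : Int) := by push_cast; ring
      have hb : (((k : Int) + 1) * 8) = ((8 * k + 8 : Nat) : Int) := by push_cast; ring
      have hlen : (pvBitsFixed (n / 256) (8 * k)).length = 8 * k := length_pvBitsFixed _ _
      rw [ha, hb, PySem.List.slice_natCast,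
        List.drop_append_of_le_length (le_of_eq hlen.symm),
        List.drop_eq_nil_of_le (le_of_eq hlen), List.nil_append]
      have h8 : 8 * k + 8 - 8 * k = 8 := by omega
      rw [h8]
      exact List.take_of_length_le (by rw [length_pvBitsFixed])
    have hparse : PySem.Int.ofCharsBase? (pvBitsFixed (n % 256) 8) 2 = some ((n % 256 : Nat) : Int) :=
      pv_parse8 ⟨n % 256, Nat.mod_lt n (by norm_num)⟩
    simp only [List.foldl_cons, List.foldl_nil, hlast, hparse]
    simp [pvBytesBE, List.append_assoc]

theorem pv_loopA_spec (k n : Nat) :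
    pvLoopA (pvBitsFixed n (8 * k)) k
      = some ((pvBytesBE n k).map fun b => PySem.Int.toChars (b : Int) ++ ['u', '8']) := by
  unfold pvLoopA
  simpa using pv_loopA_aux k n []

theorem pv_convA (n : Nat) : convert_int_to_byte_vec (n : Int) = some (pvCore n) := by
  simp only [convert_int_to_byte_vec, pv_binBody_natCast]
  rw [pv_zfill_toDigits,
    pv_pad_eq (((Nat.toDigits 2 n).length + 7) / 8 * 8) n (by omega),
    (by ring : ((Nat.toDigits 2 n).length + 7) / 8 * 8 = 8 * (((Nat.toDigits 2 n).length + 7) / 8)),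
    pv_loopA_spec]
  simp [pvCore, ← pv_lenBL]

theorem pv_lineB (n : Nat) : pvByteVecLine (n : Int) = pvCore n ++ [','] := by
  simp [pvByteVecLine, pvCore, List.append_assoc]

theorem pv_fold_conv : ∀ (l : List Int) (acc : List (List Char)), (∀ v ∈ l, 0 ≤ v) →
    l.foldl
      (fun a i => a.bind fun d =>
        (convert_int_to_byte_vec i).map fun bv =>
          d ++ [['/','/',' '] ++ PySem.Int.toChars i] ++ [bv ++ [',']])
      (some acc)
    = some (acc ++ l.flatMap fun v =>
        [['/','/',' '] ++ PySem.Int.toChars v, pvByteVecLine v]) := by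
  intro l
  induction l with
  | nil => intro acc _; simp
  | cons v t ih =>
    intro acc h
    have hv : 0 ≤ v := h v (List.mem_cons_self)
    obtain ⟨m, rfl⟩ : ∃ m : Nat, v = (m : Int) := ⟨v.toNat, (Int.toNat_of_nonneg hv).symm⟩
    rw [List.foldl_cons]
    simp only [pv_convA, Option.bind_some, Option.map_some]
    rw [ih _ (fun x hx => h x (List.mem_cons_of_mem _ hx))]
    simp [pv_lineB, List.append_assoc]

-- ===== VERDICT (by name: the statement is the Claim_ definition above) =====
theorem generate_from_bytes_mod_order_test_vector_spec : Claim_equal_generate_from_bytes_mod_order_test_vector := by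
  intro modulus _ hpre
  unfold Pre_generate_from_bytes_mod_order_test_vector at hpre
  unfold Spec_generate_from_bytes_mod_order_test_vector
  obtain ⟨M, rfl⟩ : ∃ m : Nat, modulus = (m : Int) :=
    ⟨modulus.toNat, (Int.toNat_of_nonneg (by omega)).symm⟩
  simp only [generate_from_bytes_mod_order_test_vector,
    generate_from_bytes_mod_order_test_vector_alt, pv_binBody_natCast, pv_lenBL]
  set mb : Nat := (max (PySem.Int.bitLength (M : Int)) 1 + 7) / 8 * 8 with hmb
  have hshift : (0 : Int) ≤ (M : Int) >>> (8 : Nat) := by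
    rw [Int.shiftRight_eq_div_pow]
    exact Int.ediv_nonneg (by positivity) (by positivity)
  have hpow : (0 : Int) ≤ (1 : Int) <<< mb := by
    rw [Int.shiftLeft_eq]; positivity
  have hM : (1 : Int) ≤ (M : Int) := hpre
  rw [pv_fold_conv _ _ (by
    intro v hv
    simp only [List.mem_append, List.mem_cons, List.not_mem_nil, or_false] at hv
    rcases hv with (rfl | rfl | rfl | rfl | rfl) | rfl | rfl | rfl | rfl | rfl | rfl | rfl | rfl | rfl | rfl <;>
      omega)]
  simp
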